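-- pv_equiv track=rewrite | github.com/Rise-AGI/magnus-skills | submit_Bolder_2000/reproduction/lattice_vectors.py | bresenham_3d
-- ===== SOURCE A (Python) =====
-- def bresenham_3d(c1, c2, c3):
--     """
--     3D Bresenham path from origin to (c1, c2, c3).
--     All components >= 0, c1 >= c2 >= c3 (max, mid, min).
--     Returns list of (x, y, z) positions.
--     """
--     path = [(0, 0, 0)]
--     x, y, z = 0, 0, 0
--     chi_mid = 2 * c2 - c1
--     chi_min = 2 * c3 - c1
--     for _ in range(c1):
--         x += 1
--         if chi_mid >= 0:
--             chi_mid -= 2 * c1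
--             y += 1
--         if chi_min >= 0:
--             chi_min -= 2 * c1
--             z += 1
--         chi_mid += 2 * c2
--         chi_min += 2 * c3
--         path.append((x, y, z))
--     return path
-- ===== SOURCE B (Python) =====
-- def bresenham_3d(c1, c2, c3):
--     """3D Bresenham path from origin, computed directly: each point from its
--     index by a clamped floor-division formula instead of accumulated error terms."""
--     def coord(c, i):
--         return min(i, max(0, (2 * c * i + c1) // (2 * c1)))
--     return [(0, 0, 0)] + [(i, coord(c2, i), coord(c3, i)) for i in range(1, c1 + 1)]
-- ===== Notes on version B (the rewrite author's own statement) =====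
-- stated objective: simpler
-- what changed: Replaces A's stateful loop that accumulates two Bresenham error variables with a direct per-index closed form: point i is (i, min(i, max(0, (2*c2*i+c1)//(2*c1))), min(i, max(0, (2*c3*i+c1)//(2*c1)))), proved to reproduce A's conditional increments exactly for all integer inputs.
import Mathlib
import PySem

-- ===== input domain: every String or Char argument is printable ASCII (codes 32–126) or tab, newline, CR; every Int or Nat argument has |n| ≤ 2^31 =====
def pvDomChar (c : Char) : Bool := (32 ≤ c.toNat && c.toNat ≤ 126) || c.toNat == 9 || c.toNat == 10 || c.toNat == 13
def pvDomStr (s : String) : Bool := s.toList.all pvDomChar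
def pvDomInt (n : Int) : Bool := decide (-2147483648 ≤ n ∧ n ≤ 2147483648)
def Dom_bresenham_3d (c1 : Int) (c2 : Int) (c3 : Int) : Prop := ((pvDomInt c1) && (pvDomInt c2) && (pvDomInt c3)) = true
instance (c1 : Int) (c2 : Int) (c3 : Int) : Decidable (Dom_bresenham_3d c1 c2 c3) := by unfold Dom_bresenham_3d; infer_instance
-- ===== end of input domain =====

-- B replaces A's accumulated Bresenham error variables by a direct per-index
-- closed-form (clamped floor-division) computation of each point; objective: simpler.

-- ===== PORT A =====
-- one loop iteration of A's for-body, acting on the state (x, y, z, chi_mid, chi_min, path)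
def bresStep (c1 : Int) (c2 : Int) (c3 : Int)
    (st : Int × Int × Int × Int × Int × List (Int × Int × Int)) :
    Int × Int × Int × Int × Int × List (Int × Int × Int) :=
  match st with
  | (x, y, z, chiMid, chiMin, path) =>
    let x := x + 1
    let p1 := if chiMid ≥ 0 then (chiMid - 2 * c1, y + 1) else (chiMid, y)
    let p2 := if chiMin ≥ 0 then (chiMin - 2 * c1, z + 1) else (chiMin, z)
    let chiMid := p1.1 + 2 * c2
    let chiMin := p2.1 + 2 * c3
    (x, p1.2, p2.2, chiMid, chiMin, path ++ [(x, p1.2, p2.2)])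

def bresenham_3d (c1 : Int) (c2 : Int) (c3 : Int) : List (Int × Int × Int) :=
  ((PySem.List.pyRange 0 c1).foldl (fun st _ => bresStep c1 c2 c3 st)
    (0, 0, 0, 2 * c2 - c1, 2 * c3 - c1, [(0, 0, 0)])).2.2.2.2.2

-- ===== PORT B =====
-- B's helper coord(c, i): clamped floor-division formula
def bresCoord (c1 : Int) (c : Int) (i : Int) : Int :=
  min i (max 0 (PySem.Int.floordiv (2 * c * i + c1) (2 * c1)))

def bresenham_3d_alt (c1 : Int) (c2 : Int) (c3 : Int) : List (Int × Int × Int) :=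
  [(0, 0, 0)] ++ (PySem.List.pyRange 1 (c1 + 1)).map
    (fun i => (i, bresCoord c1 c2 i, bresCoord c1 c3 i))

-- ===== PRECONDITION & SPEC =====
def Spec_bresenham_3d (c1 : Int) (c2 : Int) (c3 : Int) (out : List (Int × Int × Int)) : Prop := out = bresenham_3d_alt c1 c2 c3
instance (c1 : Int) (c2 : Int) (c3 : Int) (out : List (Int × Int × Int)) : Decidable (Spec_bresenham_3d c1 c2 c3 out) := by unfold Spec_bresenham_3d; infer_instance

-- ===== CLAIM (what is proved, stated in full; the proofs are below) =====
def Claim_equal_bresenham_3d : Prop := ∀ (c1 : Int) (c2 : Int) (c3 : Int), Dom_bresenham_3d c1 c2 c3 → Spec_bresenham_3d c1 c2 c3 (bresenham_3d c1 c2 c3)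

-- ===== LEMMAS AND PROOFS =====

-- A's error term after i iterations, expressed through B's closed form
def bresChi (c1 : Int) (c : Int) (i : Int) : Int :=
  2 * c * (i + 1) - c1 - 2 * c1 * bresCoord c1 c i

lemma bresCoord_zero (c1 c : Int) : bresCoord c1 c 0 = 0 := by
  unfold bresCoord
  generalize PySem.Int.floordiv (2 * c * 0 + c1) (2 * c1) = q
  omega

-- the heart of the equivalence: B's closed form satisfies exactly A's
-- conditional-increment recurrence
lemma bresCoord_step (c1 c : Int) (h1 : 1 ≤ c1) (i : Int) (hi : 0 ≤ i) :
    bresCoord c1 c (i + 1) =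
      if bresChi c1 c i ≥ 0 then bresCoord c1 c i + 1 else bresCoord c1 c i := by
  have hb : (0:Int) < 2 * c1 := by omega
  simp only [bresChi, bresCoord]
  have H0 := (PySem.Int.floordiv_eq_iff_of_pos (a := 2 * c * i + c1) (q := PySem.Int.floordiv (2 * c * i + c1) (2 * c1)) hb).mp rfl
  have H1 := (PySem.Int.floordiv_eq_iff_of_pos (a := 2 * c * (i + 1) + c1) (q := PySem.Int.floordiv (2 * c * (i + 1) + c1) (2 * c1)) hb).mp rfl
  set q0 := PySem.Int.floordiv (2 * c * i + c1) (2 * c1) with hq0def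
  set q1 := PySem.Int.floordiv (2 * c * (i + 1) + c1) (2 * c1) with hq1def
  obtain ⟨h0a, h0b⟩ := H0
  obtain ⟨h1a, h1b⟩ := H1
  rcases lt_or_ge c 0 with hc | hc
  · -- c < 0 : both coordinates stay 0 and chi stays negative
    have hci : c * i ≤ 0 := by nlinarith
    have hci1 : c * (i + 1) ≤ 0 := by nlinarith
    have hq0lt : q0 < 1 :=
      lt_of_mul_lt_mul_right (a := 2 * c1) (by linarith : q0 * (2 * c1) < 1 * (2 * c1)) hb.le
    have hq1lt : q1 < 1 :=
      lt_of_mul_lt_mul_right (a := 2 * c1) (by linarith : q1 * (2 * c1) < 1 * (2 * c1)) hb.le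
    have e0 : min i (max 0 q0) = 0 := by omega
    have e1 : min (i + 1) (max 0 q1) = 0 := by omega
    rw [e0, e1, if_neg (by linarith)]
  rcases lt_or_ge c1 c with hcc | hcc
  · -- c1 < c : the coordinate is clamped to i, chi is always nonnegative
    have hdi : 0 ≤ (c - c1) * i := mul_nonneg (by linarith) hi
    have hdi1 : 0 ≤ (c - c1) * (i + 1) := mul_nonneg (by linarith) (by linarith)
    have hq0ge : i < q0 + 1 :=
      lt_of_mul_lt_mul_right (a := 2 * c1) (by nlinarith : i * (2 * c1) < (q0 + 1) * (2 * c1)) hb.le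
    have hq1ge : i + 1 < q1 + 1 :=
      lt_of_mul_lt_mul_right (a := 2 * c1) (by nlinarith : (i + 1) * (2 * c1) < (q1 + 1) * (2 * c1)) hb.le
    have e0 : min i (max 0 q0) = i := by omega
    have e1 : min (i + 1) (max 0 q1) = i + 1 := by omega
    rw [e0, e1, if_pos (by nlinarith)]
  · -- 0 ≤ c ≤ c1 : the clamps are inactive, q_{i+1} tracks the increment exactly
    have hci : 0 ≤ c * i := mul_nonneg hc hi
    have hci1 : 0 ≤ c * (i + 1) := mul_nonneg hc (by linarith)
    have hcim : c * i ≤ c1 * i := mul_le_mul_of_nonneg_right hcc hi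
    have hcim1 : c * (i + 1) ≤ c1 * (i + 1) := mul_le_mul_of_nonneg_right hcc (by linarith)
    have hq0pos : 0 < q0 + 1 :=
      lt_of_mul_lt_mul_right (a := 2 * c1) (by linarith : 0 * (2 * c1) < (q0 + 1) * (2 * c1)) hb.le
    have hq1pos : 0 < q1 + 1 :=
      lt_of_mul_lt_mul_right (a := 2 * c1) (by linarith : 0 * (2 * c1) < (q1 + 1) * (2 * c1)) hb.le
    have hq0le : q0 < i + 1 :=
      lt_of_mul_lt_mul_right (a := 2 * c1) (by linarith : q0 * (2 * c1) < (i + 1) * (2 * c1)) hb.le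
    have hq1le : q1 < i + 2 :=
      lt_of_mul_lt_mul_right (a := 2 * c1) (by linarith : q1 * (2 * c1) < (i + 2) * (2 * c1)) hb.le
    have e0 : min i (max 0 q0) = q0 := by omega
    have e1 : min (i + 1) (max 0 q1) = q1 := by omega
    rw [e0, e1]
    split_ifs with h
    · have hA : (q0 + 1) * (2 * c1) ≤ 2 * c * (i + 1) + c1 := by linarith
      have hB : q0 + 1 < q1 + 1 :=
        lt_of_mul_lt_mul_right (a := 2 * c1) (by linarith : (q0 + 1) * (2 * c1) < (q1 + 1) * (2 * c1)) hb.le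
      have hC : q1 < q0 + 2 :=
        lt_of_mul_lt_mul_right (a := 2 * c1) (by linarith : q1 * (2 * c1) < (q0 + 2) * (2 * c1)) hb.le
      omega
    · have hA : 2 * c * (i + 1) + c1 < (q0 + 1) * (2 * c1) := by linarith
      have hB : q1 < q0 + 1 :=
        lt_of_mul_lt_mul_right (a := 2 * c1) (by linarith : q1 * (2 * c1) < (q0 + 1) * (2 * c1)) hb.le
      have hC : q0 < q1 + 1 :=
        lt_of_mul_lt_mul_right (a := 2 * c1) (by linarith : q0 * (2 * c1) < (q1 + 1) * (2 * c1)) hb.le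
      omega

-- A's whole loop state after n iterations, in terms of B's closed form
lemma bres_loop_inv (c1 c2 c3 : Int) (h1 : 1 ≤ c1) (n : Nat) :
    (PySem.List.pyRange 0 (n : Int)).foldl (fun st _ => bresStep c1 c2 c3 st)
      (0, 0, 0, 2 * c2 - c1, 2 * c3 - c1, [(0, 0, 0)]) =
    ((n : Int), bresCoord c1 c2 n, bresCoord c1 c3 n, bresChi c1 c2 n, bresChi c1 c3 n,
      (0, 0, 0) :: (PySem.List.pyRange 1 ((n : Int) + 1)).map
        (fun i => (i, bresCoord c1 c2 i, bresCoord c1 c3 i))) := by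
  induction n with
  | zero =>
    rw [PySem.List.pyRange_one_eq_nil (by norm_num), PySem.List.pyRange_one_eq_nil (by norm_num)]
    simp [bresChi, bresCoord_zero]
  | succ n ih =>
    have hn : ((n + 1 : Nat) : Int) = (n : Int) + 1 := by push_cast; ring
    have hnn : (0 : Int) ≤ (n : Int) := Int.natCast_nonneg n
    rw [hn, PySem.List.pyRange_one_succ_right (by omega), List.foldl_append, ih]
    have hy := bresCoord_step c1 c2 h1 (n : Int) hnn
    have hz := bresCoord_step c1 c3 h1 (n : Int) hnn
    rw [PySem.List.pyRange_one_succ_right (by omega : (1:Int) ≤ (n : Int) + 1), List.map_append]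
    simp only [bresChi] at hy hz
    simp only [List.foldl_cons, List.foldl_nil, List.map_cons, List.map_nil, bresStep, bresChi]
    rw [hy, hz]
    split_ifs with h2 h3 <;>
      refine Prod.ext (by ring) (Prod.ext (by ring) (Prod.ext (by ring)
        (Prod.ext (by ring) (Prod.ext (by ring) (by simp)))))

-- ===== VERDICT (by name: the statement is the Claim_ definition above) =====
theorem bresenham_3d_spec : Claim_equal_bresenham_3d := by
  intro c1 c2 c3 _
  unfold Spec_bresenham_3d bresenham_3d bresenham_3d_alt
  rcases le_or_gt c1 0 with h | h
  · rw [PySem.List.pyRange_one_eq_nil h, PySem.List.pyRange_one_eq_nil (by omega : c1 + 1 ≤ 1)]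
    simp
  · obtain ⟨n, rfl⟩ : ∃ n : Nat, c1 = (n : Int) := ⟨c1.toNat, (Int.toNat_of_nonneg h.le).symm⟩
    rw [bres_loop_inv _ c2 c3 (by omega) n]
    rfl
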